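-- pv_equiv track=rewrite | github.com/earthai-tech/fusionlab-learn | fusionlab/tools/app/geoprior/ui/map/utils.py | _flatten_qgroups
-- ===== SOURCE A (Python) =====
-- from typing import Dict, Iterable, List, Optional, Tuple
--
-- def _flatten_qgroups(
--     qgroups: Dict[str, Dict[str, str]],
-- ) -> List[str]:
--     out: List[str] = []
--     for base in sorted(qgroups.keys()):
--         g = qgroups[base]
--         for k in sorted(g.keys()):
--             out.append(g[k])
--     return out
-- ===== SOURCE B (Python) =====
-- from typing import Dict, List
--
-- def _flatten_qgroups(
--     qgroups: Dict[str, Dict[str, str]],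
-- ) -> List[str]:
--     items = [((base, k), v) for base, g in qgroups.items() for k, v in g.items()]
--     items.sort(key=lambda t: t[0])
--     return [v for _, v in items]
-- ===== Notes on version B (the rewrite author's own statement) =====
-- stated objective: alternative
-- what changed: collects all ((base,key),value) tuples in one pass and performs a single global lexicographic sort on the composite (base,key) key instead of two levels of nested per-dict key sorting with lookups
import Mathlib
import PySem

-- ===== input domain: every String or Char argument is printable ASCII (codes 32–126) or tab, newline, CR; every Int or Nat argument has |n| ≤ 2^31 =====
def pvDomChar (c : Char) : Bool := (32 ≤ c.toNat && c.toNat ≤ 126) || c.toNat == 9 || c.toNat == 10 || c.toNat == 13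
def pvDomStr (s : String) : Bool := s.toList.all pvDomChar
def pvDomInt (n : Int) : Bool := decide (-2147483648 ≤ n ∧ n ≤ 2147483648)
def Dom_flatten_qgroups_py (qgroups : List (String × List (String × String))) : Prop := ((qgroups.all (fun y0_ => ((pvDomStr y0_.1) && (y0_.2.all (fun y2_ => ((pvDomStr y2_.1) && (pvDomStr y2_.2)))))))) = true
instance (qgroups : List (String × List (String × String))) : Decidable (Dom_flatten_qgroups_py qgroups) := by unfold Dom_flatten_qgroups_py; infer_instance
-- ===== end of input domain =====

-- B replaces A's two-level nested per-dict key sorting with one global lexicographic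
-- sort of collected ((base, key), value) tuples; same asymptotic cost (objective: alternative).


-- ===== PORT A =====
-- for base in sorted(qgroups.keys()): g = qgroups[base]; for k in sorted(g.keys()): out.append(g[k])
-- (qgroups[base] / g[k] never raise here since base/k range over the keys, so getD is exact)
def flatten_qgroups_py (qgroups : List (String × List (String × String))) : List String :=
  (PySem.List.sorted (PySem.Dict.ofList qgroups).keys (fun k => k)).foldl
    (fun out base =>
      (PySem.List.sorted (PySem.Dict.ofList ((PySem.Dict.ofList qgroups).getD base [])).keys (fun k => k)).foldl
        (fun out k => out ++ [(PySem.Dict.ofList ((PySem.Dict.ofList qgroups).getD base [])).getD k ""]) out)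
    []

-- ===== PORT B =====
-- items = [((base, k), v) for base,g in qgroups.items() for k,v in g.items()];
-- items.sort(key=lambda t: t[0]); return [v for _, v in items]
def flatten_qgroups_py_alt (qgroups : List (String × List (String × String))) : List String :=
  (PySem.List.sorted2
      ((PySem.Dict.ofList qgroups).items.flatMap
        (fun bg => (PySem.Dict.ofList bg.2).items.map (fun kv => ((bg.1, kv.1), kv.2))))
      (fun t => t.1.1) (fun t => t.1.2)).map (fun t => t.2)

-- ===== PRECONDITION & SPEC =====
def Spec_flatten_qgroups_py (qgroups : List (String × List (String × String))) (out : List String) : Prop := out = flatten_qgroups_py_alt qgroups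
instance (qgroups : List (String × List (String × String))) (out : List String) : Decidable (Spec_flatten_qgroups_py qgroups out) := by unfold Spec_flatten_qgroups_py; infer_instance

-- ===== CLAIM (what is proved, stated in full; the proofs are below) =====
def Claim_equal_flatten_qgroups_py : Prop := ∀ (qgroups : List (String × List (String × String))), Dom_flatten_qgroups_py qgroups → Spec_flatten_qgroups_py qgroups (flatten_qgroups_py qgroups)

-- ===== LEMMAS AND PROOFS =====

-- Python's tuple sort key (base, k) is the lexicographic order: sorted2 is sorted with a Lex key.
theorem sorted2_eq_sorted_lex {α κ₁ κ₂ : Type} [LinearOrder κ₁] [LinearOrder κ₂]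
    (xs : List α) (k1 : α → κ₁) (k2 : α → κ₂) :
    PySem.List.sorted2 xs k1 k2 = PySem.List.sorted xs (fun x => toLex (k1 x, k2 x)) := by
  show List.foldl (fun acc x => PySem.List.insertBy _ x acc) [] xs
     = List.foldl (fun acc x => PySem.List.insertBy _ x acc) [] xs
  have hfun : (fun a b => decide (k1 a < k1 b) || (!decide (k1 b < k1 a) && decide (k2 a < k2 b)))
      = (fun a b : α => decide (toLex (k1 a, k2 a) < toLex (k1 b, k2 b))) := by
    funext a b
    by_cases h1 : k1 a < k1 b
    · simp [h1, Prod.Lex.lt_iff]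
    · by_cases h2 : k1 b < k1 a
      · simp [h1, h2, Prod.Lex.lt_iff, ne_of_gt h2]
      · have he : k1 a = k1 b := le_antisymm (not_lt.mp h2) (not_lt.mp h1)
        simp [he, Prod.Lex.lt_iff]
  rw [hfun]

-- elements of a lexicographically ordered flatMap over strictly increasing bases are pairwise lex-<
theorem pairwise_flatMap_lex {β : Type} [LinearOrder β]
    (bs : List β) (g : β → List ((β × β) × β))
    (hbs : bs.Pairwise (· < ·))
    (hbase : ∀ b, ∀ p ∈ g b, p.1.1 = b)
    (hinner : ∀ b, (g b).Pairwise (fun p q => p.1.2 < q.1.2)) :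
    (bs.flatMap g).Pairwise
      (fun p q => p.1.1 < q.1.1 ∨ p.1.1 = q.1.1 ∧ p.1.2 < q.1.2) := by
  induction bs with
  | nil => simp
  | cons b t ih =>
    rw [List.flatMap_cons, List.pairwise_append]
    refine ⟨?_, ih hbs.tail, ?_⟩
    · have := hinner b
      refine this.imp_of_mem ?_
      intro p q hp hq hlt
      exact Or.inr ⟨(hbase b p hp).trans (hbase b q hq).symm, hlt⟩
    · intro p hp q hq
      rcases List.mem_flatMap.mp hq with ⟨b', hb', hq'⟩
      have hlt : b < b' := (List.pairwise_cons.mp hbs).1 b' hb'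
      exact Or.inl (by rw [hbase b p hp, hbase b' q hq']; exact hlt)

-- a Nodup list sorted by the identity is pairwise strictly increasing
theorem sorted_id_pairwise_lt {β : Type} [LinearOrder β] (xs : List β) (h : xs.Nodup) :
    (PySem.List.sorted xs (fun x => x)).Pairwise (· < ·) := by
  have hnd : (PySem.List.sorted xs (fun x : β => x)).Nodup :=
    ((PySem.List.sorted_perm xs (fun x : β => x) false).nodup_iff).mpr h
  have hle := PySem.List.sorted_pairwise xs (fun x : β => x)
  exact (hle.and hnd).imp (fun ⟨h1, h2⟩ => lt_of_le_of_ne h1 h2)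

-- the value list a dict's keys look up is the items' value list
theorem map_keys_getD {κ ν β : Type} [BEq κ] [LawfulBEq κ] (d : PySem.Dict κ ν) (d0 : ν)
    (f : κ → ν → β) (hn : d.keys.Nodup) :
    d.keys.map (fun k => f k (d.getD k d0)) = d.items.map (fun kv => f kv.1 kv.2) := by
  show (d.items.map (fun x => x.1)).map _ = _
  rw [List.map_map]
  refine List.map_congr_left ?_
  intro kv hkv
  have : d.getD kv.1 d0 = kv.2 :=
    PySem.Dict.getD_of_mem_items d (by simpa using hkv) hn d0
  simp [this]

-- ===== VERDICT (by name: the statement is the Claim_ definition above) =====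
theorem flatten_qgroups_py_spec : Claim_equal_flatten_qgroups_py := by
  intro qgroups _
  unfold Spec_flatten_qgroups_py flatten_qgroups_py flatten_qgroups_py_alt
  set d := PySem.Dict.ofList qgroups with hd
  -- A's nested foldl is a flatMap of maps over the sorted key lists
  have hA : (PySem.List.sorted d.keys (fun k => k)).foldl
      (fun out base =>
        (PySem.List.sorted (PySem.Dict.ofList (d.getD base [])).keys (fun k => k)).foldl
          (fun out k => out ++ [(PySem.Dict.ofList (d.getD base [])).getD k ""]) out) []
      = ((PySem.List.sorted d.keys (fun k => k)).flatMap
          (fun base => (PySem.List.sorted (PySem.Dict.ofList (d.getD base [])).keys (fun k => k)).map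
            (fun k => ((base, k), (PySem.Dict.ofList (d.getD base [])).getD k "")))).map
          (fun t => t.2) := by
    rw [List.map_flatMap]
    have : ∀ (acc : List String),
        (PySem.List.sorted d.keys (fun k => k)).foldl
          (fun out base =>
            (PySem.List.sorted (PySem.Dict.ofList (d.getD base [])).keys (fun k => k)).foldl
              (fun out k => out ++ [(PySem.Dict.ofList (d.getD base [])).getD k ""]) out) acc
        = acc ++ (PySem.List.sorted d.keys (fun k => k)).flatMap
            (fun base => List.map (fun t => t.2)
              ((PySem.List.sorted (PySem.Dict.ofList (d.getD base [])).keys (fun k => k)).map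
                (fun k => ((base, k), (PySem.Dict.ofList (d.getD base [])).getD k "")))) := by
      intro acc
      rw [← PySem.List.foldl_append_eq_flatMap]
      refine PySem.List.foldl_congr_mem _ _ _ _ ?_
      intro out base _
      rw [PySem.List.foldl_append_singleton_eq_map, List.map_map]
      rfl
    simpa using this []
  rw [hA]
  -- name B's collected tuple list
  set items := d.items.flatMap
      (fun bg => (PySem.Dict.ofList bg.2).items.map (fun kv => ((bg.1, kv.1), kv.2))) with hitems
  -- B's single sort produces exactly A's nested arrangement
  have hsort : PySem.List.sorted2 items (fun t => t.1.1) (fun t => t.1.2)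
      = (PySem.List.sorted d.keys (fun k => k)).flatMap
          (fun base => (PySem.List.sorted (PySem.Dict.ofList (d.getD base [])).keys (fun k => k)).map
            (fun k => ((base, k), (PySem.Dict.ofList (d.getD base [])).getD k ""))) := by
    rw [sorted2_eq_sorted_lex]
    apply PySem.List.sorted_eq_of_perm_of_pairwise_lt
    · -- permutation: the nested arrangement rearranges B's collected tuples
      have h1 : ((PySem.List.sorted d.keys (fun k => k)).flatMap
          (fun base => (PySem.List.sorted (PySem.Dict.ofList (d.getD base [])).keys (fun k => k)).map
            (fun k => ((base, k), (PySem.Dict.ofList (d.getD base [])).getD k "")))).Perm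
          (d.keys.flatMap
            (fun base => (PySem.Dict.ofList (d.getD base [])).keys.map
              (fun k => ((base, k), (PySem.Dict.ofList (d.getD base [])).getD k "")))) := by
        refine List.Perm.flatMap (PySem.List.sorted_perm _ _ _) ?_
        intro base _
        exact (PySem.List.sorted_perm _ _ _).map _
      refine h1.trans (List.Perm.of_eq ?_)
      -- equality: replace keys-with-lookup by items, at both levels
      have h2 : ∀ base, (PySem.Dict.ofList (d.getD base [])).keys.map
            (fun k => ((base, k), (PySem.Dict.ofList (d.getD base [])).getD k ""))
          = (PySem.Dict.ofList (d.getD base [])).items.map (fun kv => ((base, kv.1), kv.2)) :=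
        fun base => map_keys_getD _ "" (fun k v => ((base, k), v)) (PySem.Dict.nodup_keys_ofList _)
      calc d.keys.flatMap (fun base => (PySem.Dict.ofList (d.getD base [])).keys.map
              (fun k => ((base, k), (PySem.Dict.ofList (d.getD base [])).getD k "")))
          = d.keys.flatMap (fun base =>
              (PySem.Dict.ofList (d.getD base [])).items.map (fun kv => ((base, kv.1), kv.2))) := by
            exact List.flatMap_congr (fun base _ => h2 base)
        _ = items := by
            show (d.items.map (fun x => x.1)).flatMap _ = _
            rw [List.flatMap_map, hitems]
            refine List.flatMap_congr ?_
            intro bg hbg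
            have : d.getD bg.1 [] = bg.2 :=
              PySem.Dict.getD_of_mem_items d (by simpa using hbg) (hd ▸ PySem.Dict.nodup_keys_ofList qgroups) []
            rw [this]
    · -- strict lexicographic order of the nested arrangement
      have hp := pairwise_flatMap_lex
        (PySem.List.sorted d.keys (fun k => k))
        (fun base => (PySem.List.sorted (PySem.Dict.ofList (d.getD base [])).keys (fun k => k)).map
            (fun k => ((base, k), (PySem.Dict.ofList (d.getD base [])).getD k "")))
        (sorted_id_pairwise_lt d.keys (hd ▸ PySem.Dict.nodup_keys_ofList qgroups))
        (by intro b p hp; rcases List.mem_map.mp hp with ⟨k, _, rfl⟩; rfl)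
        (by
          intro b
          rw [List.pairwise_map]
          exact sorted_id_pairwise_lt _ (PySem.Dict.nodup_keys_ofList _))
      refine hp.imp ?_
      intro p q h
      rw [Prod.Lex.lt_iff]
      exact h
  rw [hsort]
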